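-- pv_equiv track=rewrite | github.com/zxgineng/deepnlp | Named-Entity-Recognition/BiLSTM-CRF/data_loader.py | seg_en
-- ===== SOURCE A (Python) =====
-- def seg_en(text):
--     result = []
--     temp = ''
--     for n in text:
--         if str.isalpha(n):
--             temp += n
--         else:
--             if temp:
--                 result.append(temp)
--                 temp = ''
--             result.append(n)
--
--     if temp:
--         result.append(temp)
--     return result
-- ===== SOURCE B (Python) =====
-- def seg_en(text):
--     n = len(text)
--     starts = [i for i in range(n)
--               if i == 0 or not (text[i].isalpha() and text[i - 1].isalpha())]
--     starts.append(n)
--     return [text[a:b] for a, b in zip(starts, starts[1:])]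
-- ===== Notes on version B (the rewrite author's own statement) =====
-- stated objective: alternative
-- what changed: Replaces A's single pass with a pending-word accumulator by two staged passes: first compute the list of token start indices (a position starts a token unless it and its predecessor are both alphabetic), then slice the text between consecutive start positions.
import Mathlib
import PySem

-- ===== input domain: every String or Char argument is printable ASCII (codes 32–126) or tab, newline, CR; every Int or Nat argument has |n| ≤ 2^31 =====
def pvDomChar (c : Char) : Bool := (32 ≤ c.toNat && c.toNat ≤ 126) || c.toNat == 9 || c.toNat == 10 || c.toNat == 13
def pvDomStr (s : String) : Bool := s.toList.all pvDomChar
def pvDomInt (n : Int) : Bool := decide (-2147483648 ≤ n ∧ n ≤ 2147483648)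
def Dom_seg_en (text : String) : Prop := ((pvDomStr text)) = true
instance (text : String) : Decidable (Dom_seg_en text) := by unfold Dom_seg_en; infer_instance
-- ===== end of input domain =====

-- B replaces A's single accumulator pass by two staged passes: first compute the list
-- of all token start indices, then slice the text between consecutive starts.


-- ===== PORT A =====
-- one loop step: alpha chars extend temp, otherwise flush temp (if any) then emit the char
def segAStep (st : List String × List Char) (n : Char) : List String × List Char :=
  if PySem.Chars.isalpha n then (st.1, st.2 ++ [n])
  else if st.2 ≠ [] then (st.1 ++ [String.ofList st.2, String.ofList [n]], [])
  else (st.1 ++ [String.ofList [n]], [])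

def seg_en (text : String) : List String :=
  let st := text.toList.foldl segAStep ([], [])
  if st.2 ≠ [] then st.1 ++ [String.ofList st.2] else st.1

-- ===== PORT B =====
-- text[i].isalpha(); every index Source B actually evaluates is in range, so the
-- `.getD false` default of this totalization is never used
def pyAlphaAt (l : List Char) (i : Int) : Bool :=
  ((PySem.List.pyGet? l i).map PySem.Chars.isalpha).getD false

-- pass 1: token start indices (i starts a token unless chars i-1 and i are both
-- alphabetic), with len(text) appended; pass 2: slice between consecutive starts
def seg_en_alt (text : String) : List String :=
  let l := text.toList
  let n : Int := l.length
  let starts := ((PySem.List.pyRange 0 n 1).filter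
      (fun i => i == 0 || !(pyAlphaAt l i && pyAlphaAt l (i - 1)))) ++ [n]
  (starts.zip (PySem.List.slice starts (some 1) none)).map
    (fun ab => String.ofList (PySem.List.slice l (some ab.1) (some ab.2)))

-- ===== PRECONDITION & SPEC =====
def Spec_seg_en (text : String) (out : List String) : Prop := out = seg_en_alt text
instance (text : String) (out : List String) : Decidable (Spec_seg_en text out) := by unfold Spec_seg_en; infer_instance

-- ===== CLAIM (what is proved, stated in full; the proofs are below) =====
def Claim_equal_seg_en : Prop := ∀ (text : String), Dom_seg_en text → Spec_seg_en text (seg_en text)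

-- ===== LEMMAS AND PROOFS =====

def alphaN (l : List Char) (i : Nat) : Bool := (l[i]?.map PySem.Chars.isalpha).getD false
def pN (l : List Char) (i : Nat) : Bool := i == 0 || !(alphaN l i && alphaN l (i - 1))
def sN (l : List Char) : List Nat := (List.range l.length).filter (pN l)

theorem alphaN_cons_succ (c : Char) (l : List Char) (i : Nat) :
    alphaN (c :: l) (i + 1) = alphaN l i := by simp [alphaN]

theorem alphaN_cons_zero (c : Char) (l : List Char) :
    alphaN (c :: l) 0 = PySem.Chars.isalpha c := by simp [alphaN]

theorem pN_zero (l : List Char) : pN l 0 = true := rfl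

theorem pN_succ_succ (c : Char) (l : List Char) (i : Nat) :
    pN (c :: l) (i + 2) = pN l (i + 1) := by
  simp [pN, alphaN_cons_succ]

theorem sN_cons_shift (c : Char) (l : List Char)
    (h : (PySem.Chars.isalpha c && alphaN l 0) = false) :
    sN (c :: l) = 0 :: (sN l).map Nat.succ := by
  have key : ∀ i, pN (c :: l) (i + 1) = pN l i := by
    intro i
    cases i with
    | zero =>
      have := Bool.and_eq_false_iff.1 h
      rcases this with h1 | h1 <;>
        simp [pN, alphaN_cons_succ, alphaN_cons_zero, h1]
    | succ j => exact pN_succ_succ c l j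
  unfold sN
  rw [List.length_cons, List.range_succ_eq_map, List.filter_cons, pN_zero,
    List.filter_map]
  simp only [if_pos trivial, Function.comp_def]
  congr 1
  exact congrArg _ (List.filter_congr (fun i _ => key i))

theorem sN_head (l : List Char) (hl : l ≠ []) : sN l = 0 :: (sN l).tail := by
  cases l with
  | nil => exact absurd rfl hl
  | cons d l' =>
    unfold sN
    rw [List.length_cons, List.range_succ_eq_map, List.filter_cons, pN_zero]
    simp

theorem filter_range_succ (p : Nat → Bool) (n : Nat) (hp : p 0 = true) :
    (List.range (n + 1)).filter p = 0 :: ((List.range n).filter (fun i => p (i + 1))).map Nat.succ := by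
  rw [List.range_succ_eq_map, List.filter_cons, hp, List.filter_map]
  simp [Function.comp_def]

theorem filter_range_succ_false (p : Nat → Bool) (n : Nat) (hp : p 0 = false) :
    (List.range (n + 1)).filter p = ((List.range n).filter (fun i => p (i + 1))).map Nat.succ := by
  rw [List.range_succ_eq_map, List.filter_cons, hp, List.filter_map]
  simp [Function.comp_def]

theorem sN_cons_merge (c : Char) (l : List Char)
    (hc : PySem.Chars.isalpha c = true) (hl : alphaN l 0 = true) :
    sN (c :: l) = 0 :: ((sN l).tail).map Nat.succ := by
  cases l with
  | nil => simp [alphaN] at hl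
  | cons d l' =>
    have h1 : (fun i => pN (c :: d :: l') (i + 1)) 0 = false := by
      simp [pN, alphaN_cons_succ, alphaN_cons_zero]
      exact ⟨by simpa [alphaN_cons_zero] using hl, hc⟩
    unfold sN
    rw [List.length_cons, List.length_cons, filter_range_succ _ _ (pN_zero _),
      filter_range_succ_false _ _ h1,
      filter_range_succ (pN (d :: l')) _ (pN_zero _),
      List.filter_congr (fun i _ => pN_succ_succ c (d :: l') i)]
    simp

def sFull (l : List Char) : List Nat := sN l ++ [l.length]
def tokN (l : List Char) (ab : Nat × Nat) : String :=
  String.ofList ((l.drop ab.1).take (ab.2 - ab.1))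
def tokensN (l : List Char) : List String := ((sFull l).zip ((sFull l).tail)).map (tokN l)

theorem sFull_head (l : List Char) : sFull l = 0 :: (sFull l).tail := by
  cases l with
  | nil => rfl
  | cons d l' =>
    unfold sFull
    rw [sN_head _ (by simp)]
    simp

theorem tokN_succ (c : Char) (l : List Char) (a b : Nat) :
    tokN (c :: l) (a + 1, b + 1) = tokN l (a, b) := by
  simp [tokN, Nat.succ_sub_succ]

theorem sFull_cons_shift (c : Char) (l : List Char)
    (h : (PySem.Chars.isalpha c && alphaN l 0) = false) :
    sFull (c :: l) = 0 :: (sFull l).map Nat.succ := by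
  unfold sFull
  rw [sN_cons_shift c l h]
  simp

theorem sFull_cons_merge (c : Char) (l : List Char)
    (hc : PySem.Chars.isalpha c = true) (hl : alphaN l 0 = true) :
    sFull (c :: l) = 0 :: ((sFull l).tail).map Nat.succ := by
  have hl' : l ≠ [] := by rintro rfl; simp [alphaN] at hl
  unfold sFull
  rw [sN_cons_merge c l hc hl, sN_head l hl']
  simp

theorem tokensN_cons_shift (c : Char) (l : List Char)
    (h : (PySem.Chars.isalpha c && alphaN l 0) = false) :
    tokensN (c :: l) = String.ofList [c] :: tokensN l := by
  obtain ⟨u, hu⟩ : ∃ u, sFull l = 0 :: u := ⟨_, sFull_head l⟩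
  unfold tokensN
  rw [sFull_cons_shift c l h, hu]
  simp only [List.map_cons, List.tail_cons, List.zip_cons_cons]
  rw [show (Nat.succ 0 :: u.map Nat.succ) = (0 :: u).map Nat.succ from rfl,
    List.zip_map, List.map_map]
  congr 1
  simp [tokN]

theorem sFull_tail_ne_nil (l : List Char) (hl : l ≠ []) : (sFull l).tail ≠ [] := by
  have hmem : l.length ∈ sFull l := by unfold sFull; simp
  have hpos : 0 < l.length := List.length_pos_iff.mpr hl
  rw [sFull_head l] at hmem
  intro hnil
  rw [hnil] at hmem
  simp only [List.mem_singleton] at hmem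
  omega

theorem tokensN_cons_merge (c : Char) (l : List Char)
    (hc : PySem.Chars.isalpha c = true) (hl : alphaN l 0 = true) :
    tokensN (c :: l) =
      match tokensN l with
      | [] => [String.ofList [c]]
      | s :: rest => String.ofList (c :: s.toList) :: rest := by
  have hl' : l ≠ [] := by rintro rfl; simp [alphaN] at hl
  obtain ⟨u0, u', hu'⟩ := List.exists_cons_of_ne_nil (sFull_tail_ne_nil l hl')
  have hu : sFull l = 0 :: u0 :: u' := by rw [sFull_head l, hu']
  have htl : tokensN l = tokN l (0, u0) :: ((u0 :: u').zip u').map (tokN l) := by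
    unfold tokensN
    rw [hu]
    simp [List.zip_cons_cons]
  rw [htl]
  simp only []
  unfold tokensN
  rw [sFull_cons_merge c l hc hl, hu']
  simp only [List.map_cons, List.tail_cons, List.zip_cons_cons]
  rw [show (Nat.succ u0 :: u'.map Nat.succ) = (u0 :: u').map Nat.succ from rfl,
    List.zip_map, List.map_map]
  congr 1
  · simp [tokN, List.take_succ_cons]
  · exact List.map_congr_left (fun ab _ => by
      obtain ⟨a, b⟩ := ab
      simpa using tokN_succ c l a b)

def segF : List Char → List String
  | [] => []
  | c :: l =>
    if PySem.Chars.isalpha c && alphaN l 0 then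
      match segF l with
      | [] => [String.ofList [c]]
      | s :: rest => String.ofList (c :: s.toList) :: rest
    else String.ofList [c] :: segF l

theorem segF_cons_of_not_merge (c : Char) (l : List Char)
    (h : (PySem.Chars.isalpha c && alphaN l 0) = false) :
    segF (c :: l) = String.ofList [c] :: segF l := by
  rw [segF, h]
  simp

theorem segF_run (r m : List Char) (hr : r ≠ [])
    (hra : ∀ x ∈ r, PySem.Chars.isalpha x = true)
    (hm : alphaN m 0 = false) :
    segF (r ++ m) = String.ofList r :: segF m := by
  induction r with
  | nil => cases hr rfl
  | cons t ts ih =>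
    cases ts with
    | nil =>
      rw [List.cons_append, List.nil_append,
        segF_cons_of_not_merge t m (by simp [hm])]
    | cons t2 ts' =>
      have h2 : alphaN ((t2 :: ts') ++ m) 0 = true := by
        simpa [alphaN_cons_zero] using hra t2 (by simp)
      rw [List.cons_append, segF,
        ih (by simp) (fun x hx => hra x (by simp [hx]))]
      simp only [hra t (by simp), h2, Bool.and_self, if_pos]
      simp

def segAFinish (st : List String × List Char) : List String :=
  if st.2 ≠ [] then st.1 ++ [String.ofList st.2] else st.1

theorem segA_invariant (l : List Char) :
    ∀ (res : List String) (temp : List Char),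
      (∀ c ∈ temp, PySem.Chars.isalpha c = true) →
      segAFinish (l.foldl segAStep (res, temp)) = res ++ segF (temp ++ l) := by
  induction l with
  | nil =>
    intro res temp htemp
    rw [List.foldl_nil, List.append_nil]
    cases temp with
    | nil => simp [segAFinish, segF]
    | cons t ts =>
      rw [show segF (t :: ts) = segF ((t :: ts) ++ []) by simp,
        segF_run (t :: ts) [] (by simp) htemp (by simp [alphaN])]
      simp [segAFinish, segF]
  | cons c l' ih =>
    intro res temp htemp
    by_cases hc : PySem.Chars.isalpha c = true
    · have hstep : segAStep (res, temp) c = (res, temp ++ [c]) := by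
        simp [segAStep, hc]
      have hall : ∀ x ∈ temp ++ [c], PySem.Chars.isalpha x = true := by
        intro x hx
        rcases List.mem_append.1 hx with h | h
        · exact htemp x h
        · simp only [List.mem_singleton] at h
          rw [h]; exact hc
      rw [List.foldl_cons, hstep, ih res (temp ++ [c]) hall]
      simp
    · have hc' : PySem.Chars.isalpha c = false := by simpa using hc
      cases temp with
      | nil =>
        have hstep : segAStep (res, []) c = (res ++ [String.ofList [c]], []) := by
          simp [segAStep, hc']
        rw [List.foldl_cons, hstep, ih _ [] (by simp), List.nil_append,
          List.nil_append, segF_cons_of_not_merge c l' (by simp [hc'])]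
        simp
      | cons t ts =>
        have hstep : segAStep (res, t :: ts) c =
            (res ++ [String.ofList (t :: ts), String.ofList [c]], []) := by
          simp [segAStep, hc']
        rw [List.foldl_cons, hstep, ih _ [] (by simp), List.nil_append,
          segF_run (t :: ts) (c :: l') (by simp) htemp (by simp [alphaN_cons_zero, hc']),
          segF_cons_of_not_merge c l' (by simp [hc'])]
        simp

theorem pyRange_zero_cast (n : Nat) :
    PySem.List.pyRange 0 (n : Int) 1 = (List.range n).map Int.ofNat := by
  rw [PySem.List.pyRange_one]
  simp [List.map_eq_flatMap]

theorem pyAlphaAt_natCast (l : List Char) (i : Nat) :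
    pyAlphaAt l (i : Int) = alphaN l i := by
  simp [pyAlphaAt, alphaN, pysem]

theorem alt_eq_tokensN (text : String) : seg_en_alt text = tokensN text.toList := by
  unfold seg_en_alt tokensN
  simp only []
  have hstarts :
      ((PySem.List.pyRange 0 (text.toList.length : Int) 1).filter
          (fun i => i == 0 || !(pyAlphaAt text.toList i && pyAlphaAt text.toList (i - 1))))
        ++ [(text.toList.length : Int)] =
      (sFull text.toList).map Int.ofNat := by
    rw [pyRange_zero_cast, List.filter_map,
      List.filter_congr (l := List.range text.toList.length)
        (q := fun i => pN text.toList i)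
        (fun i _ => by
          cases i with
          | zero => rfl
          | succ j =>
            have h1 : ((j + 1 : Nat) : Int) - 1 = (j : Int) := by push_cast; ring
            simp only [Function.comp_apply, Int.ofNat_eq_natCast, pN,
              pyAlphaAt_natCast, h1]
            simp
            omega)]
    simp [sFull, sN]
  rw [hstarts, PySem.List.slice_from_one, ← List.map_tail, List.zip_map, List.map_map]
  exact List.map_congr_left (fun ab _ => by
    obtain ⟨a, b⟩ := ab
    simp [tokN, PySem.List.slice_natCast])

theorem tokensN_eq_segF (l : List Char) : tokensN l = segF l := by
  induction l with
  | nil => rfl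
  | cons c l ih =>
    by_cases h : (PySem.Chars.isalpha c && alphaN l 0) = true
    · obtain ⟨hc, hl⟩ := Bool.and_eq_true_iff.1 h
      rw [tokensN_cons_merge c l hc hl, ih, segF, h]
      simp
    · have h' : (PySem.Chars.isalpha c && alphaN l 0) = false := by simpa using h
      rw [tokensN_cons_shift c l h', ih, segF, h']
      simp

-- ===== VERDICT (by name: the statement is the Claim_ definition above) =====
theorem seg_en_spec : Claim_equal_seg_en := by
  intro text _
  unfold Spec_seg_en
  rw [alt_eq_tokensN, tokensN_eq_segF]
  have h := segA_invariant text.toList [] [] (by simp)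
  simpa [seg_en, segAFinish] using h
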